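-- pv_equiv track=rewrite | github.com/hhelleboid/Projet_Cloud_M2 | app/chunking.py | _greedy_pack
-- ===== SOURCE A (Python) =====
-- from typing import List, Dict, Any, Tuple
--
-- def _greedy_pack(parts: List[Tuple[str, int, int]], max_chars: int) -> List[List[Tuple[str, int, int]]]:
--     """
--     Empaquette des phrases (texte, start, end) en blocs <= max_chars (ordre préservé).
--     On recolle avec un espace unique entre phrases.
--     """
--     blocks: List[List[Tuple[str, int, int]]] = []
--     cur: List[Tuple[str, int, int]] = []
--     cur_len = 0
--     for t, s, e in parts:
--         t_stripped = t.strip()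
--         if not t_stripped:
--             continue
--         add = len(t_stripped) if not cur else (1 + len(t_stripped))  # +1 pour espace entre phrases
--         if cur and cur_len + add > max_chars:
--             blocks.append(cur)
--             cur = [(t_stripped, s, e)]
--             cur_len = len(t_stripped)
--         else:
--             if cur:
--                 cur_len += 1 + len(t_stripped)
--             else:
--                 cur_len = len(t_stripped)
--             cur.append((t_stripped, s, e))
--     if cur:
--         blocks.append(cur)
--     return blocks
-- ===== SOURCE B (Python) =====
-- from typing import List, Tuple
--
-- def _greedy_pack(parts: List[Tuple[str, int, int]], max_chars: int) -> List[List[Tuple[str, int, int]]]: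
--     # Cleanup pass first: strip texts, drop empties.
--     cleaned = [(t.strip(), s, e) for t, s, e in parts if t.strip()]
--     blocks: List[List[Tuple[str, int, int]]] = []
--     cur: List[Tuple[str, int, int]] = []
--     for item in cleaned:
--         # Prospective joined length computed directly: sum of text lengths + one space per separator.
--         new_len = sum(len(x[0]) for x in cur) + len(cur) + len(item[0])
--         if cur and new_len > max_chars:
--             blocks.append(cur)
--             cur = [item]
--         else:
--             cur = cur + [item]
--     if cur:
--         blocks.append(cur)
--     return blocks
-- ===== Notes on version B (the rewrite author's own statement) =====
-- stated objective: alternative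
-- what changed: B first does a cleanup pass (strip + drop empties) and then packs greedily without maintaining a running length accumulator, computing the prospective block length directly from the current block each step.
import Mathlib
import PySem

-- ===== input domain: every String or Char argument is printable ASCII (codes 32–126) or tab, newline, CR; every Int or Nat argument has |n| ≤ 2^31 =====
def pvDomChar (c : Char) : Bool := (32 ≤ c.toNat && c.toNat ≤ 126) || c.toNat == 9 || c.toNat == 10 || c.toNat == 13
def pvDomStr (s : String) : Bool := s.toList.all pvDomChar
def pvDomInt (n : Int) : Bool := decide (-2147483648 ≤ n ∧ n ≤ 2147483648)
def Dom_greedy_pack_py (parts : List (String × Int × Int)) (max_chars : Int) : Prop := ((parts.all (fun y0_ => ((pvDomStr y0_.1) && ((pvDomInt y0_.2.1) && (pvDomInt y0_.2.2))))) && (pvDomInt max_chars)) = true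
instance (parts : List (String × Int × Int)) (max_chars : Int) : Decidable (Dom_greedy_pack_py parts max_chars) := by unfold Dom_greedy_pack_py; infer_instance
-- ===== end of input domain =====

-- B replaces A's running-length accumulator by a cleanup pass plus a direct per-step length computation; alternative decomposition, same results.

-- ===== PORT A =====
-- loop body of A: state = (blocks, cur, cur_len)
def pvStepA (max_chars : Int)
    (st : List (List (String × Int × Int)) × List (String × Int × Int) × Int)
    (p : String × Int × Int) :
    List (List (String × Int × Int)) × List (String × Int × Int) × Int :=
  let (blocks, cur, cur_len) := st
  let ts := PySem.Str.strip p.1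
  if ts = "" then (blocks, cur, cur_len)
  else
    let add := if cur.isEmpty then PySem.Str.len ts else 1 + PySem.Str.len ts
    if ¬ cur.isEmpty ∧ cur_len + add > max_chars then
      (blocks ++ [cur], [(ts, p.2.1, p.2.2)], PySem.Str.len ts)
    else
      if cur.isEmpty then
        (blocks, cur ++ [(ts, p.2.1, p.2.2)], PySem.Str.len ts)
      else
        (blocks, cur ++ [(ts, p.2.1, p.2.2)], cur_len + 1 + PySem.Str.len ts)

def greedy_pack_py (parts : List (String × Int × Int)) (max_chars : Int) : List (List (String × Int × Int)) :=
  let st := parts.foldl (pvStepA max_chars) ([], [], 0)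
  if st.2.1.isEmpty then st.1 else st.1 ++ [st.2.1]

-- ===== PORT B =====
-- cleanup pass: strip each text, drop empties
def pvClean (parts : List (String × Int × Int)) : List (String × Int × Int) :=
  parts.filterMap (fun p =>
    let ts := PySem.Str.strip p.1
    if ts = "" then none else some (ts, p.2.1, p.2.2))

-- loop body of B: state = (blocks, cur); prospective length computed directly
def pvStepB (max_chars : Int)
    (st : List (List (String × Int × Int)) × List (String × Int × Int))
    (item : String × Int × Int) :
    List (List (String × Int × Int)) × List (String × Int × Int) :=
  let (blocks, cur) := st
  let newLen := (cur.map (fun x => PySem.Str.len x.1)).sum + (cur.length : Int) + PySem.Str.len item.1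
  if ¬ cur.isEmpty ∧ newLen > max_chars then (blocks ++ [cur], [item])
  else (blocks, cur ++ [item])

def greedy_pack_py_alt (parts : List (String × Int × Int)) (max_chars : Int) : List (List (String × Int × Int)) :=
  let st := (pvClean parts).foldl (pvStepB max_chars) ([], [])
  if st.2.isEmpty then st.1 else st.1 ++ [st.2]

-- ===== PRECONDITION & SPEC =====
def Spec_greedy_pack_py (parts : List (String × Int × Int)) (max_chars : Int) (out : List (List (String × Int × Int))) : Prop := out = greedy_pack_py_alt parts max_chars
instance (parts : List (String × Int × Int)) (max_chars : Int) (out : List (List (String × Int × Int))) : Decidable (Spec_greedy_pack_py parts max_chars out) := by unfold Spec_greedy_pack_py; infer_instance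

-- ===== CLAIM (what is proved, stated in full; the proofs are below) =====
def Claim_equal_greedy_pack_py : Prop := ∀ (parts : List (String × Int × Int)) (max_chars : Int), Dom_greedy_pack_py parts max_chars → Spec_greedy_pack_py parts max_chars (greedy_pack_py parts max_chars)

-- ===== LEMMAS AND PROOFS =====

-- A's running accumulator equals B's directly-computed block length whenever cur is nonempty
def pvInv (cur : List (String × Int × Int)) (cur_len : Int) : Prop :=
  cur ≠ [] → cur_len = (cur.map (fun x => PySem.Str.len x.1)).sum + (cur.length : Int) - 1

lemma pv_fold_agree (max_chars : Int) :
    ∀ (parts : List (String × Int × Int)) (blocks : List (List (String × Int × Int)))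
      (cur : List (String × Int × Int)) (cur_len : Int), pvInv cur cur_len →
      (parts.foldl (pvStepA max_chars) (blocks, cur, cur_len)).1
        = ((pvClean parts).foldl (pvStepB max_chars) (blocks, cur)).1 ∧
      (parts.foldl (pvStepA max_chars) (blocks, cur, cur_len)).2.1
        = ((pvClean parts).foldl (pvStepB max_chars) (blocks, cur)).2 := by
  intro parts
  induction parts with
  | nil => intro blocks cur cur_len _; exact ⟨rfl, rfl⟩
  | cons p rest ih =>
    intro blocks cur cur_len hinv
    by_cases hts : PySem.Str.strip p.1 = ""
    · simpa [pvClean, pvStepA, hts] using ih blocks cur cur_len hinv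
    · simp only [pvClean, List.filterMap_cons, if_neg hts, List.foldl_cons]
      rcases eq_or_ne cur [] with hcur | hcur
      · subst hcur
        have eA : pvStepA max_chars (blocks, [], cur_len) p
            = (blocks, [(PySem.Str.strip p.1, p.2.1, p.2.2)], PySem.Str.len (PySem.Str.strip p.1)) := by
          simp [pvStepA, hts]
        have eB : pvStepB max_chars (blocks, []) (PySem.Str.strip p.1, p.2.1, p.2.2)
            = (blocks, [(PySem.Str.strip p.1, p.2.1, p.2.2)]) := by
          simp [pvStepB]
        rw [eA, eB]
        refine ih _ _ _ ?_
        intro _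
        simp only [List.map_cons, List.map_nil, List.sum_cons, List.sum_nil,
          List.length_cons, List.length_nil]
        omega
      · have hlen := hinv hcur
        have hne : cur.isEmpty = false := by simpa [List.isEmpty_iff] using hcur
        have hL : PySem.Str.len (PySem.Str.strip p.1)
            = ((PySem.Chars.strip p.1.toList).length : Int) := by simp
        have hM : (cur.map (fun x => PySem.Str.len x.1)).sum
            = (cur.map (fun x => (x.1.length : Int))).sum := by simp
        by_cases hc : cur_len + (1 + ((PySem.Chars.strip p.1.toList).length : Int)) > max_chars
        · have hcB : max_chars < (cur.map (fun x => (x.1.length : Int))).sum + (cur.length : Int)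
              + ((PySem.Chars.strip p.1.toList).length : Int) := by omega
          have eA : pvStepA max_chars (blocks, cur, cur_len) p
              = (blocks ++ [cur], [(PySem.Str.strip p.1, p.2.1, p.2.2)], PySem.Str.len (PySem.Str.strip p.1)) := by
            simp [pvStepA, hts, hne, hc]
          have eB : pvStepB max_chars (blocks, cur) (PySem.Str.strip p.1, p.2.1, p.2.2)
              = (blocks ++ [cur], [(PySem.Str.strip p.1, p.2.1, p.2.2)]) := by
            simp [pvStepB, hne, hcB]
          rw [eA, eB]
          refine ih _ _ _ ?_
          intro _
          simp only [List.map_cons, List.map_nil, List.sum_cons, List.sum_nil,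
            List.length_cons, List.length_nil]
          omega
        · have hcB : (cur.map (fun x => (x.1.length : Int))).sum + (cur.length : Int)
              + ((PySem.Chars.strip p.1.toList).length : Int) ≤ max_chars := by omega
          have eA : pvStepA max_chars (blocks, cur, cur_len) p
              = (blocks, cur ++ [(PySem.Str.strip p.1, p.2.1, p.2.2)],
                  cur_len + 1 + PySem.Str.len (PySem.Str.strip p.1)) := by
            simp [pvStepA, hts, hne, hc]
          have eB : pvStepB max_chars (blocks, cur) (PySem.Str.strip p.1, p.2.1, p.2.2)
              = (blocks, cur ++ [(PySem.Str.strip p.1, p.2.1, p.2.2)]) := by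
            simp [pvStepB, hne, hcB]
          rw [eA, eB]
          refine ih _ _ _ ?_
          intro _
          simp only [List.map_append, List.sum_append, List.length_append, List.map_cons,
            List.map_nil, List.sum_cons, List.sum_nil, List.length_cons, List.length_nil]
          push_cast
          omega

-- ===== VERDICT (by name: the statement is the Claim_ definition above) =====
theorem greedy_pack_py_spec : Claim_equal_greedy_pack_py := by
  intro parts max_chars _
  unfold Spec_greedy_pack_py greedy_pack_py greedy_pack_py_alt
  obtain ⟨h1, h2⟩ := pv_fold_agree max_chars parts [] [] 0 (by intro h; exact absurd rfl h)
  simp only [h1, h2]
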